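-- pv_equiv track=rewrite | github.com/jessiepdx/ryo_chat | hypermindlabs/agents.py | _hostname_allowed
-- ===== SOURCE A (Python) =====
-- from typing import Any, AsyncIterator
--
-- def _as_text(value: Any, fallback: str = "") -> str:
--     cleaned = str(value if value is not None else "").strip()
--     return cleaned if cleaned else fallback
--
-- def _hostname_allowed(hostname: str, allowlist: list[str]) -> bool:
--     host = _as_text(hostname).lower().strip(".")
--     if not host:
--         return False
--     if not allowlist:
--         return True
--     for allowed_raw in allowlist:
--         allowed = _as_text(allowed_raw).lower().strip(".")
--         if not allowed:
--             continue
--         if allowed.startswith("*."):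
--             allowed = allowed[2:]
--         if host == allowed or host.endswith(f".{allowed}"):
--             return True
--     return False
-- ===== SOURCE B (Python) =====
-- def _hostname_allowed(hostname: str, allowlist: list[str]) -> bool:
--     host = str(hostname).strip().lower().strip(".")
--     if not host:
--         return False
--     if not allowlist:
--         return True
--     allowed_set = set()
--     for raw in allowlist:
--         entry = str(raw).strip().lower().strip(".")
--         if not entry:
--             continue
--         if entry.startswith("*."):
--             entry = entry[2:]
--         allowed_set.add(entry)
--     suffixes = [host] + [host[i + 1:] for i in range(len(host)) if host[i] == "."]
--     return any(s in allowed_set for s in suffixes)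
-- ===== Notes on version B (the rewrite author's own statement) =====
-- stated objective: alternative
-- what changed: B normalizes the allowlist once into a set and tests the host's dot-boundary suffixes for membership, instead of A's per-entry equality/endswith scan of the allowlist.
import Mathlib
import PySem

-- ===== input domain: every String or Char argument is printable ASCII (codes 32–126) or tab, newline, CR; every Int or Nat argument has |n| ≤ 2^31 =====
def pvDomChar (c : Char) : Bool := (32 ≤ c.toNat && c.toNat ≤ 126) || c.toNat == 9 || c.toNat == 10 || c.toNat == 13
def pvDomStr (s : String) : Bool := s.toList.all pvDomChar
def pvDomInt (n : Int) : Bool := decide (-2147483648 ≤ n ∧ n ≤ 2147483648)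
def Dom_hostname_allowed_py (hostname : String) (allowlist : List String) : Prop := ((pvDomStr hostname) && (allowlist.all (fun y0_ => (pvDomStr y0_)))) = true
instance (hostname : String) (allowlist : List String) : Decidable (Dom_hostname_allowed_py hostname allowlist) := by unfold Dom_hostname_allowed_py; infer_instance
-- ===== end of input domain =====

-- B replaces A's per-entry scan of the allowlist (string compare + endswith each time) by a set of
-- normalized allowed domains probed with the host's dot-boundary suffixes (objective: alternative).


-- ===== PORT A =====
-- _as_text(value) with fallback "" (str arguments only): strip, keep if truthy else fallback
def pvAsTextA (value : List Char) (fallback : List Char) : List Char :=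
  let cleaned := PySem.Chars.strip value
  if cleaned.isEmpty then fallback else cleaned

-- _as_text(x).lower().strip(".")
def pvNormA (s : List Char) : List Char :=
  PySem.Chars.stripChars (PySem.Chars.lower (pvAsTextA s [])) ['.']

-- the for-loop over the allowlist, early return True on a match
def pvLoopA (host : List Char) : List String → Bool
  | [] => false
  | rawAllowed :: rest =>
    let allowed := pvNormA rawAllowed.toList
    if allowed.isEmpty then pvLoopA host rest
    else
      let allowed := if PySem.Chars.startswith allowed ['*', '.'] then PySem.Chars.slice allowed (some 2) none else allowed
      -- f".{allowed}" ported as '.' :: allowed (exact string concatenation on List Char)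
      if host == allowed || PySem.Chars.endswith host ('.' :: allowed) then true
      else pvLoopA host rest

def hostname_allowed_py (hostname : String) (allowlist : List String) : Bool :=
  let host := pvNormA hostname.toList
  if host.isEmpty then false
  else if allowlist.isEmpty then true
  else pvLoopA host allowlist

-- ===== PORT B =====
-- str(raw).strip().lower().strip(".")
def pvNormB (s : List Char) : List Char :=
  PySem.Chars.stripChars (PySem.Chars.lower (PySem.Chars.strip s)) ['.']

-- the set-building loop over the allowlist
def pvAllowedSet (allowlist : List String) : PySem.Set (List Char) :=
  allowlist.foldl (fun acc raw =>
    let entry := pvNormB raw.toList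
    if entry.isEmpty then acc
    else
      let entry := if PySem.Chars.startswith entry ['*', '.'] then PySem.Chars.slice entry (some 2) none else entry
      PySem.Set.add acc entry) PySem.Set.empty

-- [host[i+1:] for i in range(len(host)) if host[i] == "."], with host prepended
def pvSuffixes (host : List Char) : List (List Char) :=
  host :: ((List.range host.length).filter (fun i => host.getD i ' ' == '.')).map (fun i => host.drop (i + 1))

def hostname_allowed_py_alt (hostname : String) (allowlist : List String) : Bool :=
  let host := pvNormB hostname.toList
  if host.isEmpty then false
  else if allowlist.isEmpty then true
  else
    let allowedSet := pvAllowedSet allowlist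
    (pvSuffixes host).any (fun s => PySem.Set.contains allowedSet s)

-- ===== PRECONDITION & SPEC =====
def Spec_hostname_allowed_py (hostname : String) (allowlist : List String) (out : Bool) : Prop := out = hostname_allowed_py_alt hostname allowlist
instance (hostname : String) (allowlist : List String) (out : Bool) : Decidable (Spec_hostname_allowed_py hostname allowlist out) := by unfold Spec_hostname_allowed_py; infer_instance

-- ===== CLAIM (what is proved, stated in full; the proofs are below) =====
def Claim_equal_hostname_allowed_py : Prop := ∀ (hostname : String) (allowlist : List String), Dom_hostname_allowed_py hostname allowlist → Spec_hostname_allowed_py hostname allowlist (hostname_allowed_py hostname allowlist)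

-- ===== LEMMAS AND PROOFS =====

-- the two normalizations agree (A's _as_text with fallback "" is just strip)
theorem pvNormA_eq_pvNormB (s : List Char) : pvNormA s = pvNormB s := by
  unfold pvNormA pvNormB pvAsTextA
  by_cases h : (PySem.Chars.strip s).isEmpty
  · simp [List.isEmpty_iff.mp h]
  · simp [h]

-- the wildcard-collapsed normalized entry
def pvWNorm (raw : String) : List Char :=
  let e := pvNormB raw.toList
  if PySem.Chars.startswith e ['*', '.'] then PySem.Chars.slice e (some 2) none else e

-- '.'-prefixed suffix characterization
theorem pvEndswith_dot_iff (host a : List Char) :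
    PySem.Chars.endswith host ('.' :: a) = true ↔
      ∃ i, i < host.length ∧ host[i]? = some '.' ∧ host.drop (i + 1) = a := by
  rw [PySem.Chars.endswith_iff]
  constructor
  · rintro ⟨p, hp⟩
    subst hp
    exact ⟨p.length, by simp, by simp, by simp⟩
  · rintro ⟨i, hi, hget, hdrop⟩
    refine ⟨host.take i, ?_⟩
    have h1 : host.drop i = host[i] :: host.drop (i + 1) := List.drop_eq_getElem_cons hi
    have h2 : host[i] = '.' := by
      have := List.getElem?_eq_getElem hi
      rw [this] at hget; exact Option.some.inj hget
    calc host.take i ++ ('.' :: a) = host.take i ++ host.drop i := by rw [h1, h2, hdrop]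
      _ = host := List.take_append_drop i host

theorem pvMem_suffixes_iff (host a : List Char) :
    a ∈ pvSuffixes host ↔
      (host = a ∨ PySem.Chars.endswith host ('.' :: a) = true) := by
  rw [pvEndswith_dot_iff]
  simp only [pvSuffixes, List.mem_cons, List.mem_map, List.mem_filter, List.mem_range]
  constructor
  · rintro (h | ⟨i, ⟨hi, hd⟩, hdrop⟩)
    · exact Or.inl h.symm
    · refine Or.inr ⟨i, hi, ?_, hdrop⟩
      have hD : host[i] = '.' := by
        have := hd; rw [List.getD_eq_getElem _ _ hi] at this; simpa using this
      rw [List.getElem?_eq_getElem hi, hD]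
  · rintro (h | ⟨i, hi, hget, hdrop⟩)
    · exact Or.inl h.symm
    · refine Or.inr ⟨i, ⟨hi, ?_⟩, hdrop⟩
      rw [List.getD_eq_getElem?_getD, hget]
      simp

-- membership in the set built by B's fold
theorem pvMem_allowedSet_aux (l : List String) (acc : PySem.Set (List Char)) (a : List Char) :
    a ∈ l.foldl (fun acc raw =>
      let entry := pvNormB raw.toList
      if entry.isEmpty then acc
      else
        let entry := if PySem.Chars.startswith entry ['*', '.'] then PySem.Chars.slice entry (some 2) none else entry
        PySem.Set.add acc entry) acc ↔
    a ∈ acc ∨ ∃ raw ∈ l, ¬(pvNormB raw.toList).isEmpty = true ∧ pvWNorm raw = a := by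
  induction l generalizing acc with
  | nil => simp
  | cons raw rest ih =>
    simp only [List.foldl_cons]
    by_cases h : (pvNormB raw.toList).isEmpty
    · rw [if_pos h, ih]
      simp only [List.mem_cons]
      constructor
      · rintro (ha | ⟨r, hr, hp⟩)
        · exact Or.inl ha
        · exact Or.inr ⟨r, Or.inr hr, hp⟩
      · rintro (ha | ⟨r, (rfl | hr), hp⟩)
        · exact Or.inl ha
        · exact absurd h (by simpa using hp.1)
        · exact Or.inr ⟨r, hr, hp⟩
    · rw [if_neg h, ih]
      simp only [PySem.Set.mem_add, List.mem_cons]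
      constructor
      · rintro ((ha | rfl) | ⟨r, hr, hp⟩)
        · exact Or.inl ha
        · exact Or.inr ⟨raw, Or.inl rfl, h, rfl⟩
        · exact Or.inr ⟨r, Or.inr hr, hp⟩
      · rintro (ha | ⟨r, (rfl | hr), hne, rfl⟩)
        · exact Or.inl (Or.inl ha)
        · exact Or.inl (Or.inr rfl)
        · exact Or.inr ⟨r, hr, hne, rfl⟩

theorem pvMem_allowedSet (l : List String) (a : List Char) :
    a ∈ pvAllowedSet l ↔ ∃ raw ∈ l, ¬(pvNormB raw.toList).isEmpty = true ∧ pvWNorm raw = a := by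
  rw [pvAllowedSet, pvMem_allowedSet_aux]
  simp [PySem.Set.empty]

-- A's loop as an existential
theorem pvLoopA_iff (host : List Char) (l : List String) :
    pvLoopA host l = true ↔
      ∃ raw ∈ l, ¬(pvNormB raw.toList).isEmpty = true ∧
        (host = pvWNorm raw ∨ PySem.Chars.endswith host ('.' :: pvWNorm raw) = true) := by
  induction l with
  | nil => simp [pvLoopA]
  | cons raw rest ih =>
    rw [pvLoopA, pvNormA_eq_pvNormB]
    show (if (pvNormB raw.toList).isEmpty then pvLoopA host rest
          else if host == pvWNorm raw || PySem.Chars.endswith host ('.' :: pvWNorm raw) then true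
          else pvLoopA host rest) = true ↔ _
    by_cases h : (pvNormB raw.toList).isEmpty
    · rw [if_pos h, ih]
      constructor
      · rintro ⟨r, hr, hp⟩; exact ⟨r, List.mem_cons_of_mem _ hr, hp⟩
      · rintro ⟨r, hr, hne, hm⟩
        rcases List.mem_cons.mp hr with rfl | hr
        · exact absurd h hne
        · exact ⟨r, hr, hne, hm⟩
    · rw [if_neg h]
      by_cases hm : (host == pvWNorm raw || PySem.Chars.endswith host ('.' :: pvWNorm raw)) = true
      · rw [if_pos hm]
        have hm' : host = pvWNorm raw ∨ PySem.Chars.endswith host ('.' :: pvWNorm raw) = true := by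
          simpa using hm
        rcases hm' with he | he
        · exact iff_of_true rfl ⟨raw, List.mem_cons_self, h, Or.inl he⟩
        · exact iff_of_true rfl ⟨raw, List.mem_cons_self, h, Or.inr he⟩
      · rw [if_neg hm, ih]
        constructor
        · rintro ⟨r, hr, hp⟩; exact ⟨r, List.mem_cons_of_mem _ hr, hp⟩
        · rintro ⟨r, hr, hne, hmm⟩
          rcases List.mem_cons.mp hr with rfl | hr
          · exfalso; apply hm
            rcases hmm with he | he
            · simp [he]
            · simp [he]
          · exact ⟨r, hr, hne, hmm⟩

-- B's suffix scan as an existential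
theorem pvAltAny_iff (host : List Char) (l : List String) :
    ((pvSuffixes host).any (fun s => PySem.Set.contains (pvAllowedSet l) s)) = true ↔
      ∃ raw ∈ l, ¬(pvNormB raw.toList).isEmpty = true ∧
        (host = pvWNorm raw ∨ PySem.Chars.endswith host ('.' :: pvWNorm raw) = true) := by
  rw [List.any_eq_true]
  constructor
  · rintro ⟨s, hs, hc⟩
    rw [PySem.Set.contains_iff, pvMem_allowedSet] at hc
    obtain ⟨raw, hraw, hne, hw⟩ := hc
    exact ⟨raw, hraw, hne, (pvMem_suffixes_iff host s).mp hs |>.imp (by rintro rfl; rw [hw]) (by rintro he; rw [hw]; exact he)⟩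
  · rintro ⟨raw, hraw, hne, hm⟩
    refine ⟨pvWNorm raw, (pvMem_suffixes_iff host _).mpr hm, ?_⟩
    rw [PySem.Set.contains_iff, pvMem_allowedSet]
    exact ⟨raw, hraw, hne, rfl⟩

-- ===== VERDICT (by name: the statement is the Claim_ definition above) =====
theorem hostname_allowed_py_spec : Claim_equal_hostname_allowed_py := by
  intro hostname allowlist _
  unfold Spec_hostname_allowed_py hostname_allowed_py hostname_allowed_py_alt
  rw [pvNormA_eq_pvNormB]
  by_cases h1 : (pvNormB hostname.toList).isEmpty
  · simp [h1]
  · rw [if_neg h1, if_neg h1]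
    by_cases h2 : allowlist.isEmpty
    · simp [h2]
    · rw [if_neg h2, if_neg h2]
      rw [Bool.eq_iff_iff, pvLoopA_iff, pvAltAny_iff]
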